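-- pv_equiv track=rewrite | github.com/LuanWillian/mini_cadastro | Projeto1/dados/validar.py | procurar_caracter
-- ===== SOURCE A (Python) =====
-- def procurar_caracter(usuario):
--     letras = ' abcdefghijklmnopqrstuvwxyzABCDEFGHIJKLMNOPQRSTUVWXYZ0123456789'
--     lista = []
--     contador = 0
--     for c in usuario:
--         lista.append(c)
--     for c in range(0, len(lista)):
--         if not lista[c] in letras:
--             contador += 1
--     if contador == 0:
--         return False
--     else:
--         return True
-- ===== SOURCE B (Python) =====
-- def procurar_caracter(usuario):
--     letras = ' abcdefghijklmnopqrstuvwxyzABCDEFGHIJKLMNOPQRSTUVWXYZ0123456789'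
--     return bool(set(usuario) - set(letras))
-- ===== Notes on version B (the rewrite author's own statement) =====
-- stated objective: idiomatic
-- what changed: Replaces the list copy, index loop and per-character scan of the 64-char allowed string with a single set-difference expression (set(usuario) - set(letras)) whose truthiness is the answer.
import Mathlib
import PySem

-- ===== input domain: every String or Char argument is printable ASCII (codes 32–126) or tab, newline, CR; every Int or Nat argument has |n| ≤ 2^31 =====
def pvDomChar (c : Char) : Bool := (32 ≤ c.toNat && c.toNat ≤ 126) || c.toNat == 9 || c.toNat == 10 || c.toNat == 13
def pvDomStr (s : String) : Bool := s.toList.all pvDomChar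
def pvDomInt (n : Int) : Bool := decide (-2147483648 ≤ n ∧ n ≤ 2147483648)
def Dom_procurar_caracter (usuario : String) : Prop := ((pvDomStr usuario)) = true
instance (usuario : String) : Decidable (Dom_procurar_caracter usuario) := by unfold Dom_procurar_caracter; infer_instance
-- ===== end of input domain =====

-- B replaces A's list copy, index loop and counter by one set-difference expression (idiomatic; same result).

-- ===== PORT A =====
def procurar_caracter (usuario : String) : Bool :=
  let letras := " abcdefghijklmnopqrstuvwxyzABCDEFGHIJKLMNOPQRSTUVWXYZ0123456789"
  let lista := usuario.toList.foldl (fun l c => l ++ [c]) []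
  let contador : Int := (PySem.List.pyRange 0 (lista.length : Int) 1).foldl
      (fun contador c =>
        if !(letras.toList.contains (PySem.List.pyGetD lista c ' ')) then contador + 1 else contador) 0
  if contador == 0 then false else true

-- ===== PORT B =====
def procurar_caracter_alt (usuario : String) : Bool :=
  let letras := " abcdefghijklmnopqrstuvwxyzABCDEFGHIJKLMNOPQRSTUVWXYZ0123456789"
  -- bool(set(usuario) - set(letras)) : truthiness of a set = nonempty
  !(PySem.Set.diff (PySem.Set.ofList usuario.toList) (PySem.Set.ofList letras.toList)).isEmpty

-- ===== PRECONDITION & SPEC =====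
def Spec_procurar_caracter (usuario : String) (out : Bool) : Prop := out = procurar_caracter_alt usuario
instance (usuario : String) (out : Bool) : Decidable (Spec_procurar_caracter usuario out) := by unfold Spec_procurar_caracter; infer_instance

-- ===== CLAIM (what is proved, stated in full; the proofs are below) =====
def Claim_equal_procurar_caracter : Prop := ∀ (usuario : String), Dom_procurar_caracter usuario → Spec_procurar_caracter usuario (procurar_caracter usuario)

-- ===== LEMMAS AND PROOFS =====

-- the counting fold in A: result = init + number of elements failing the membership test
theorem pv_foldl_count (p : Char → Bool) (l : List Char) (n : Int) :
    l.foldl (fun acc c => if !(p c) then acc + 1 else acc) n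
      = n + (l.countP (fun c => !(p c)) : Int) := by
  induction l generalizing n with
  | nil => simp
  | cons x xs ih =>
    simp only [List.foldl_cons, List.countP_cons, ih]
    by_cases h : p x <;> simp [h] <;> try omega

-- A's boolean = "some character of usuario is not in letras"
theorem pv_A_char (usuario : String) :
    procurar_caracter usuario
      = usuario.toList.any (fun c => !((" abcdefghijklmnopqrstuvwxyzABCDEFGHIJKLMNOPQRSTUVWXYZ0123456789").toList.contains c)) := by
  unfold procurar_caracter
  simp only [PySem.List.foldl_append_singleton_eq_self, List.nil_append]
  rw [PySem.List.foldl_pyRange_pyGetD' usuario.toList ' '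
      (fun acc c => if !((" abcdefghijklmnopqrstuvwxyzABCDEFGHIJKLMNOPQRSTUVWXYZ0123456789").toList.contains c) then acc + 1 else acc) 0 (by norm_num)]
  rw [pv_foldl_count]
  simp only [Int.toNat_zero, List.drop_zero, Int.zero_add]
  rcases h : usuario.toList.any (fun c => !((" abcdefghijklmnopqrstuvwxyzABCDEFGHIJKLMNOPQRSTUVWXYZ0123456789").toList.contains c)) with _ | _
  · rw [List.any_eq_false] at h
    have hc : usuario.toList.countP (fun c => !((" abcdefghijklmnopqrstuvwxyzABCDEFGHIJKLMNOPQRSTUVWXYZ0123456789").toList.contains c)) = 0 :=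
      List.countP_eq_zero.mpr h
    rw [hc]; norm_num
  · rw [List.any_eq_true] at h
    obtain ⟨a, ha, hp⟩ := h
    have hc : 0 < usuario.toList.countP (fun c => !((" abcdefghijklmnopqrstuvwxyzABCDEFGHIJKLMNOPQRSTUVWXYZ0123456789").toList.contains c)) :=
      List.countP_pos_iff.mpr ⟨a, ha, hp⟩
    have h2 : ((usuario.toList.countP (fun c => !((" abcdefghijklmnopqrstuvwxyzABCDEFGHIJKLMNOPQRSTUVWXYZ0123456789").toList.contains c)) : Int)) ≠ 0 := by
      exact_mod_cast Nat.pos_iff_ne_zero.mp hc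
    rw [if_neg]
    simpa using h2

-- B's boolean = the same condition
theorem pv_B_char (usuario : String) :
    procurar_caracter_alt usuario
      = usuario.toList.any (fun c => !((" abcdefghijklmnopqrstuvwxyzABCDEFGHIJKLMNOPQRSTUVWXYZ0123456789").toList.contains c)) := by
  simp only [procurar_caracter_alt]
  rcases h : usuario.toList.any (fun c => !((" abcdefghijklmnopqrstuvwxyzABCDEFGHIJKLMNOPQRSTUVWXYZ0123456789").toList.contains c)) with _ | _
  · simp only [List.any_eq_false, Bool.not_eq_true', Bool.not_eq_false] at h
    have hd : PySem.Set.diff (PySem.Set.ofList usuario.toList) (PySem.Set.ofList (" abcdefghijklmnopqrstuvwxyzABCDEFGHIJKLMNOPQRSTUVWXYZ0123456789").toList) = [] := by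
      rw [List.eq_nil_iff_forall_not_mem]
      intro y hy
      rw [PySem.Set.mem_diff, PySem.Set.mem_ofList, PySem.Set.mem_ofList] at hy
      exact hy.2 (List.mem_of_elem_eq_true (h y hy.1))
    rw [hd]; rfl
  · simp only [List.any_eq_true, Bool.not_eq_true'] at h
    obtain ⟨a, ha, hp⟩ := h
    have hd : a ∈ PySem.Set.diff (PySem.Set.ofList usuario.toList) (PySem.Set.ofList (" abcdefghijklmnopqrstuvwxyzABCDEFGHIJKLMNOPQRSTUVWXYZ0123456789").toList) := by
      rw [PySem.Set.mem_diff, PySem.Set.mem_ofList, PySem.Set.mem_ofList]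
      refine ⟨ha, fun hm => ?_⟩
      rw [List.contains_eq_mem, decide_eq_false_iff_not] at hp
      exact hp hm
    rw [Bool.not_eq_true', List.isEmpty_eq_false_iff]
    exact List.ne_nil_of_mem hd

-- ===== VERDICT (by name: the statement is the Claim_ definition above) =====
theorem procurar_caracter_spec : Claim_equal_procurar_caracter := by
  intro usuario _
  unfold Spec_procurar_caracter
  rw [pv_A_char, pv_B_char]
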